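-- pv_equiv track=rewrite | github.com/vishalpatill/Spotter | backend/app/ai/biomechanics_engine.py | _determine_severity
-- ===== SOURCE A (Python) =====
-- from typing import List, Dict, Tuple, Optional
--
-- def _determine_severity(dangers: List[str]) -> str:
--     """Determine overall danger severity from list of alerts"""
--
--     if not dangers:
--         return "none"
--
--     # Critical patterns
--     critical = ["deadlift_rounded_back_critical", "spine_fracture_risk"]
--     if any(d in dangers for d in critical):
--         return "critical"
--
--     # High severity
--     high = ["rounded_back", "knee_valgus_left", "knee_valgus_right"]
--     if any(d in dangers for d in high):
--         return "high"
--
--     # Medium severity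
--     medium = ["excessive_forward_lean", "uneven_press"]
--     if any(d in dangers for d in medium):
--         return "medium"
--
--     return "low"
-- ===== SOURCE B (Python) =====
-- def _determine_severity(dangers):
--     """Determine overall danger severity from list of alerts"""
--     if not dangers:
--         return "none"
--     ranks = {
--         "deadlift_rounded_back_critical": 3,
--         "spine_fracture_risk": 3,
--         "rounded_back": 2,
--         "knee_valgus_left": 2,
--         "knee_valgus_right": 2,
--         "excessive_forward_lean": 1,
--         "uneven_press": 1,
--     }
--     m = 0
--     for d in dangers:
--         r = ranks.get(d, 0)
--         if r > m:
--             m = r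
--     return {3: "critical", 2: "high", 1: "medium"}.get(m, "low")
-- ===== Notes on version B (the rewrite author's own statement) =====
-- stated objective: alternative
-- what changed: Replaces the priority-ordered scans over three category lists (each probing membership in dangers) with a single pass over dangers tracking the maximum severity rank from one string-to-rank dict, mapping the max back to a label.
import Mathlib
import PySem

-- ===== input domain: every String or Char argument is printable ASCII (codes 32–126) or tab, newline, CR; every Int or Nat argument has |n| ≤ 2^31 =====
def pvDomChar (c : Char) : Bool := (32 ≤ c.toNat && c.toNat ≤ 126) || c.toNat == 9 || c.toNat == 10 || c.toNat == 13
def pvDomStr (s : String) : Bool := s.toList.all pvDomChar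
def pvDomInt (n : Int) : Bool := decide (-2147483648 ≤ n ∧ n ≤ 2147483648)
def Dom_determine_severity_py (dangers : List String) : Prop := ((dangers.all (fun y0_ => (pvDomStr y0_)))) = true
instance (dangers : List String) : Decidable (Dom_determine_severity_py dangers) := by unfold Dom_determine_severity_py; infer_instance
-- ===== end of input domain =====

-- B replaces A's priority-ordered membership scans over three category lists by a single pass
-- over `dangers` tracking the maximum severity rank from one string→rank dict (alternative decomposition, same cost class).


-- ===== PORT A =====
def determine_severity_py (dangers : List String) : String :=
  if dangers = [] then "none"
  else
    let critical : List String := ["deadlift_rounded_back_critical", "spine_fracture_risk"]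
    if critical.any (fun d => dangers.contains d) then "critical"
    else
      let high : List String := ["rounded_back", "knee_valgus_left", "knee_valgus_right"]
      if high.any (fun d => dangers.contains d) then "high"
      else
        let medium : List String := ["excessive_forward_lean", "uneven_press"]
        if medium.any (fun d => dangers.contains d) then "medium"
        else "low"

-- ===== PORT B =====
def pvRanks : PySem.Dict String Int :=
  PySem.Dict.ofList
    [("deadlift_rounded_back_critical", 3), ("spine_fracture_risk", 3),
     ("rounded_back", 2), ("knee_valgus_left", 2), ("knee_valgus_right", 2),
     ("excessive_forward_lean", 1), ("uneven_press", 1)]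

def determine_severity_py_alt (dangers : List String) : String :=
  if dangers = [] then "none"
  else
    let m := dangers.foldl (fun m d => let r := pvRanks.getD d 0; if r > m then r else m) 0
    (PySem.Dict.ofList [((3 : Int), "critical"), ((2 : Int), "high"), ((1 : Int), "medium")]).getD m "low"

-- ===== PRECONDITION & SPEC =====
def Spec_determine_severity_py (dangers : List String) (out : String) : Prop := out = determine_severity_py_alt dangers
instance (dangers : List String) (out : String) : Decidable (Spec_determine_severity_py dangers out) := by unfold Spec_determine_severity_py; infer_instance

-- ===== CLAIM (what is proved, stated in full; the proofs are below) =====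
def Claim_equal_determine_severity_py : Prop := ∀ (dangers : List String), Dom_determine_severity_py dangers → Spec_determine_severity_py dangers (determine_severity_py dangers)

-- ===== LEMMAS AND PROOFS =====

-- rank of one danger string, as B's dict lookup
def pvRk (d : String) : Int := pvRanks.getD d 0

lemma pvRk_eq (d : String) : pvRk d =
    if "deadlift_rounded_back_critical" = d then 3
    else if "spine_fracture_risk" = d then 3
    else if "rounded_back" = d then 2
    else if "knee_valgus_left" = d then 2
    else if "knee_valgus_right" = d then 2
    else if "excessive_forward_lean" = d then 1
    else if "uneven_press" = d then 1
    else 0 := by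
  have h : pvRanks = PySem.Dict.mk
    [("deadlift_rounded_back_critical", 3), ("spine_fracture_risk", 3),
     ("rounded_back", 2), ("knee_valgus_left", 2), ("knee_valgus_right", 2),
     ("excessive_forward_lean", 1), ("uneven_press", 1)] := by rfl
  rw [pvRk, h]
  simp only [PySem.Dict.getD_eq_get?_getD, PySem.Dict.get?_mk_cons, beq_iff_eq]
  split_ifs <;> rfl

lemma pvRk_le_three (d : String) : pvRk d ≤ 3 := by rw [pvRk_eq]; split_ifs <;> omega

lemma pv_fold_le_iff (l : List String) (acc b : Int) :
    l.foldl (fun m d => max m (pvRk d)) acc ≤ b ↔ acc ≤ b ∧ ∀ x ∈ l, pvRk x ≤ b := by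
  induction l generalizing acc with
  | nil => simp
  | cons a t ih => simp [ih]; tauto

lemma pv_le_fold_iff (l : List String) (acc k : Int) :
    k ≤ l.foldl (fun m d => max m (pvRk d)) acc ↔ k ≤ acc ∨ ∃ x ∈ l, k ≤ pvRk x := by
  induction l generalizing acc with
  | nil => simp
  | cons a t ih => simp [ih]; tauto

lemma pv_alt_eq (a : String) (t : List String) :
    determine_severity_py_alt (a :: t) =
      (PySem.Dict.ofList [((3 : Int), "critical"), ((2 : Int), "high"), ((1 : Int), "medium")]).getD
        ((a :: t).foldl (fun m d => max m (pvRk d)) 0) "low" := by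
  have hf : (fun (m : Int) (d : String) => let r := pvRanks.getD d 0; if r > m then r else m)
      = fun m d => max m (pvRk d) := by
    funext m d
    simp only [pvRk, max_def]
    split_ifs <;> omega
  simp [determine_severity_py_alt, hf]

theorem pv_main (dangers : List String) :
    determine_severity_py dangers = determine_severity_py_alt dangers := by
  rcases dangers with _ | ⟨a, t⟩
  · rfl
  rw [pv_alt_eq]
  set M := (a :: t).foldl (fun m d => max m (pvRk d)) 0 with hM
  have hMle : ∀ b : Int, 0 ≤ b → ((∀ x ∈ a :: t, pvRk x ≤ b) → M ≤ b) := by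
    intro b hb h; rw [hM, pv_fold_le_iff]; exact ⟨hb, h⟩
  have hMge : ∀ x ∈ a :: t, pvRk x ≤ M := by
    intro x hx
    rw [hM, pv_le_fold_iff]; exact Or.inr ⟨x, hx, le_refl _⟩
  by_cases h3 : "deadlift_rounded_back_critical" ∈ a :: t ∨ "spine_fracture_risk" ∈ a :: t
  · have hM3 : M = 3 := by
      have h1 : M ≤ 3 := hMle 3 (by omega) (fun x _ => pvRk_le_three x)
      have h2 : (3 : Int) ≤ M := by
        rcases h3 with h | h <;>
          · have := hMge _ h; rw [pvRk_eq] at this; simp at this; omega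
      omega
    have hA1 : (["deadlift_rounded_back_critical", "spine_fracture_risk"] : List String).any
        (fun d => (a :: t).contains d) = true := by simpa using h3
    rw [hM3]
    simp only [determine_severity_py, if_neg (List.cons_ne_nil a t), hA1]
    rfl
  · push Not at h3
    have hA1 : (["deadlift_rounded_back_critical", "spine_fracture_risk"] : List String).any
        (fun d => (a :: t).contains d) = false := by
      simp only [List.any_eq_false]
      intro d hd
      simp only [List.mem_cons, List.not_mem_nil, or_false] at hd
      rcases hd with rfl | rfl <;> simp_all
    have hne3 : ∀ x ∈ a :: t, pvRk x ≤ 2 := by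
      intro x hx
      rw [pvRk_eq]
      split_ifs with g1 g2 <;> try omega
      · subst g1; exact absurd hx h3.1
      · subst g2; exact absurd hx h3.2
    by_cases h2 : "rounded_back" ∈ a :: t ∨ "knee_valgus_left" ∈ a :: t ∨ "knee_valgus_right" ∈ a :: t
    · have hM2 : M = 2 := by
        have hle : M ≤ 2 := hMle 2 (by omega) hne3
        have hge : (2 : Int) ≤ M := by
          rcases h2 with h | h | h <;>
            · have := hMge _ h; rw [pvRk_eq] at this; simp at this; omega
        omega
      have hA2 : (["rounded_back", "knee_valgus_left", "knee_valgus_right"] : List String).any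
          (fun d => (a :: t).contains d) = true := by simpa using h2
      rw [hM2]
      simp only [determine_severity_py, if_neg (List.cons_ne_nil a t), hA1, hA2]
      rfl
    · push Not at h2
      have hA2 : (["rounded_back", "knee_valgus_left", "knee_valgus_right"] : List String).any
          (fun d => (a :: t).contains d) = false := by
        simp only [List.any_eq_false]
        intro d hd
        simp only [List.mem_cons, List.not_mem_nil, or_false] at hd
        rcases hd with rfl | rfl | rfl <;> simp_all
      have hne2 : ∀ x ∈ a :: t, pvRk x ≤ 1 := by
        intro x hx
        rw [pvRk_eq]
        split_ifs with g1 g2 g3 g4 g5 <;> try omega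
        · subst g1; exact absurd hx h3.1
        · subst g2; exact absurd hx h3.2
        · subst g3; exact absurd hx h2.1
        · subst g4; exact absurd hx h2.2.1
        · subst g5; exact absurd hx h2.2.2
      by_cases h1 : "excessive_forward_lean" ∈ a :: t ∨ "uneven_press" ∈ a :: t
      · have hM1 : M = 1 := by
          have hle : M ≤ 1 := hMle 1 (by omega) hne2
          have hge : (1 : Int) ≤ M := by
            rcases h1 with h | h <;>
              · have := hMge _ h; rw [pvRk_eq] at this; simp at this; omega
          omega
        have hA3 : (["excessive_forward_lean", "uneven_press"] : List String).any
            (fun d => (a :: t).contains d) = true := by simpa using h1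
        rw [hM1]
        simp only [determine_severity_py, if_neg (List.cons_ne_nil a t), hA1, hA2, hA3]
        rfl
      · push Not at h1
        have hA3 : (["excessive_forward_lean", "uneven_press"] : List String).any
            (fun d => (a :: t).contains d) = false := by
          simp only [List.any_eq_false]
          intro d hd
          simp only [List.mem_cons, List.not_mem_nil, or_false] at hd
          rcases hd with rfl | rfl <;> simp_all
        have hne1 : ∀ x ∈ a :: t, pvRk x ≤ 0 := by
          intro x hx
          rw [pvRk_eq]
          split_ifs with g1 g2 g3 g4 g5 g6 g7 <;> try omega
          · subst g1; exact absurd hx h3.1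
          · subst g2; exact absurd hx h3.2
          · subst g3; exact absurd hx h2.1
          · subst g4; exact absurd hx h2.2.1
          · subst g5; exact absurd hx h2.2.2
          · subst g6; exact absurd hx h1.1
          · subst g7; exact absurd hx h1.2
        have hM0 : M = 0 := by
          have hle : M ≤ 0 := hMle 0 (by omega) hne1
          have hge : (0 : Int) ≤ M := by rw [hM, pv_le_fold_iff]; exact Or.inl (le_refl _)
          omega
        rw [hM0]
        simp only [determine_severity_py, if_neg (List.cons_ne_nil a t), hA1, hA2, hA3]
        rfl

-- ===== VERDICT (by name: the statement is the Claim_ definition above) =====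
theorem determine_severity_py_spec : Claim_equal_determine_severity_py := by
  intro dangers _
  unfold Spec_determine_severity_py
  exact pv_main dangers
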